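-- pv_equiv track=rewrite | github.com/bucket1582/acmipc | 자료구조/트리/1780번 종이의 개수.py | check_all_0_or_1_or_m_1
-- ===== SOURCE A (Python) =====
-- def check_all_0_or_1_or_m_1(table):
--     all_0 = True
--     all_1 = True
--     all_m_1 = True
--     for row in table:
--         for cell in row:
--             if cell != 0:
--                 all_0 = False
--             if cell != 1:
--                 all_1 = False
--             if cell != -1:
--                 all_m_1 = False
--     if all_0:
--         return 0
--     if all_1:
--         return 1
--     if all_m_1:
--         return -1
--     return -2
-- ===== SOURCE B (Python) =====
-- def check_all_0_or_1_or_m_1(table):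
--     values = {cell for row in table for cell in row}
--     if not values:
--         return 0
--     if values == {0}:
--         return 0
--     if values == {1}:
--         return 1
--     if values == {-1}:
--         return -1
--     return -2
-- ===== Notes on version B (the rewrite author's own statement) =====
-- stated objective: simpler
-- what changed: Replaces the three running boolean flags over nested loops with a single distinct-values set built in one comprehension and a flat decision on its contents.
import Mathlib
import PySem

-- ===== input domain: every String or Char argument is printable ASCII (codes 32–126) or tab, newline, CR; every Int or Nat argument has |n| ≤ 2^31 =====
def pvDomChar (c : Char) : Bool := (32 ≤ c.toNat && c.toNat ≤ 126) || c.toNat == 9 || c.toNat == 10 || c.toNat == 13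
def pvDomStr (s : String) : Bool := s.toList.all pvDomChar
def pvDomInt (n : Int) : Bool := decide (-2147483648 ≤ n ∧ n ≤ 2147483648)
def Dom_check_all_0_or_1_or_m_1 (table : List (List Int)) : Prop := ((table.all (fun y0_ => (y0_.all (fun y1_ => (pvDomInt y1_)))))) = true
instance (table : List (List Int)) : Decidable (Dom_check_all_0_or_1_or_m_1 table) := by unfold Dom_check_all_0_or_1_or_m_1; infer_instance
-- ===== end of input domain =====

-- B replaces A's three running boolean flags with a single distinct-values set
-- and a flat decision on its contents (objective: simpler).

-- ===== PORT A =====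
-- state = (all_0, all_1, all_m_1); each cell updates the flags exactly as A's ifs do
def pvStepA (s : Bool × Bool × Bool) (cell : Int) : Bool × Bool × Bool :=
  ((if cell ≠ 0 then false else s.1),
   (if cell ≠ 1 then false else s.2.1),
   (if cell ≠ -1 then false else s.2.2))

def check_all_0_or_1_or_m_1 (table : List (List Int)) : Int :=
  let s := table.foldl (fun s row => row.foldl pvStepA s) (true, true, true)
  if s.1 then 0
  else if s.2.1 then 1
  else if s.2.2 then -1
  else -2

-- ===== PORT B =====
def check_all_0_or_1_or_m_1_alt (table : List (List Int)) : Int :=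
  let values : PySem.Set Int := PySem.Set.ofList (table.flatMap (fun row => row))
  if values = [] then 0
  else if PySem.Set.equal values (PySem.Set.ofList [0]) then 0
  else if PySem.Set.equal values (PySem.Set.ofList [1]) then 1
  else if PySem.Set.equal values (PySem.Set.ofList [-1]) then -1
  else -2

-- ===== PRECONDITION & SPEC =====
def Spec_check_all_0_or_1_or_m_1 (table : List (List Int)) (out : Int) : Prop := out = check_all_0_or_1_or_m_1_alt table
instance (table : List (List Int)) (out : Int) : Decidable (Spec_check_all_0_or_1_or_m_1 table out) := by unfold Spec_check_all_0_or_1_or_m_1; infer_instance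

-- ===== CLAIM (what is proved, stated in full; the proofs are below) =====
def Claim_equal_check_all_0_or_1_or_m_1 : Prop := ∀ (table : List (List Int)), Dom_check_all_0_or_1_or_m_1 table → Spec_check_all_0_or_1_or_m_1 table (check_all_0_or_1_or_m_1 table)

-- ===== LEMMAS AND PROOFS =====

-- A's inner loop: the flags are and-ed with "every cell of the row equals c"
theorem foldl_stepA_row (row : List Int) (s : Bool × Bool × Bool) :
    row.foldl pvStepA s =
      (s.1 && decide (∀ x ∈ row, x = 0),
       s.2.1 && decide (∀ x ∈ row, x = 1),
       s.2.2 && decide (∀ x ∈ row, x = -1)) := by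
  induction row generalizing s with
  | nil => simp
  | cons a t ih =>
    simp only [List.foldl_cons, ih, pvStepA, List.mem_cons]
    obtain ⟨b0, b1, bm⟩ := s
    by_cases h0 : a = 0 <;> by_cases h1 : a = 1 <;> by_cases hm : a = -1 <;>
      simp [h0, h1, hm]

-- A's whole loop over the flattened table
theorem foldl_stepA_table (table : List (List Int)) (s : Bool × Bool × Bool) :
    table.foldl (fun s row => row.foldl pvStepA s) s =
      (s.1 && decide (∀ x ∈ table.flatMap (fun row => row), x = 0),
       s.2.1 && decide (∀ x ∈ table.flatMap (fun row => row), x = 1),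
       s.2.2 && decide (∀ x ∈ table.flatMap (fun row => row), x = -1)) := by
  induction table generalizing s with
  | nil => simp
  | cons r t ih =>
    rw [List.foldl_cons, foldl_stepA_row, ih]
    have hf : List.flatMap (fun row => row) (r :: t) = r ++ List.flatMap (fun row => row) t := rfl
    rw [hf]
    refine Prod.ext ?_ (Prod.ext ?_ ?_) <;>
      simp only [List.forall_mem_append, Bool.decide_and, Bool.and_assoc]

theorem ofList_eq_nil_iff (L : List Int) : PySem.Set.ofList L = [] ↔ L = [] := by
  cases L with
  | nil => simp
  | cons a t => simp [PySem.Set.ofList_cons]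

theorem equal_singleton_iff (L : List Int) (c : Int) :
    PySem.Set.equal (PySem.Set.ofList L) (PySem.Set.ofList [c]) = true ↔
      ((∀ x ∈ L, x = c) ∧ c ∈ L) := by
  rw [PySem.Set.equal_iff]
  constructor
  · intro h
    constructor
    · intro x hx
      have := (h x).1 (by simpa [PySem.Set.mem_ofList] using hx)
      simpa [PySem.Set.mem_ofList] using this
    · have := (h c).2 (by simp [PySem.Set.mem_ofList])
      simpa [PySem.Set.mem_ofList] using this
  · rintro ⟨hall, hmem⟩ x
    simp only [PySem.Set.mem_ofList, List.mem_singleton]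
    constructor
    · exact fun hx => hall x hx
    · rintro rfl; exact hmem

-- ===== VERDICT (by name: the statement is the Claim_ definition above) =====
theorem check_all_0_or_1_or_m_1_spec : Claim_equal_check_all_0_or_1_or_m_1 := by
  intro table _
  unfold Spec_check_all_0_or_1_or_m_1 check_all_0_or_1_or_m_1 check_all_0_or_1_or_m_1_alt
  simp only [foldl_stepA_table, Bool.true_and]
  set L := table.flatMap (fun row => row) with hL
  by_cases hnil : L = []
  · simp [hnil]
  · have hne : ¬ PySem.Set.ofList L = [] := by
      simpa [ofList_eq_nil_iff] using hnil
    rcases List.exists_mem_of_ne_nil L hnil with ⟨y, hy⟩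
    simp only [hne, if_false, equal_singleton_iff]
    have e0 : ((∀ x ∈ L, x = 0) ∧ (0:Int) ∈ L) ↔ (∀ x ∈ L, x = 0) :=
      ⟨And.left, fun h => ⟨h, (h y hy) ▸ hy⟩⟩
    have e1 : ((∀ x ∈ L, x = 1) ∧ (1:Int) ∈ L) ↔ (∀ x ∈ L, x = 1) :=
      ⟨And.left, fun h => ⟨h, (h y hy) ▸ hy⟩⟩
    have em : ((∀ x ∈ L, x = -1) ∧ (-1:Int) ∈ L) ↔ (∀ x ∈ L, x = -1) :=
      ⟨And.left, fun h => ⟨h, (h y hy) ▸ hy⟩⟩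
    simp only [e0, e1, em]
    simp
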